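-- pv_equiv track=rewrite | github.com/lokesh-bottu/Naviga | Restaurant.py | get_city_count
-- ===== SOURCE A (Python) =====
-- def get_city_count(data):
--     city_count = {}
--     for rest in data:
--         country = rest['Country']
--         city = rest['City']
--         if(country in city_count.keys()):
--             city_count[country][city] = city_count[country].get(city,0)+1
--         else:
--             city_count[country] ={}
--             city_count[country][city]=1
--     return city_count
-- ===== SOURCE B (Python) =====
-- def get_city_count(data):
--     counts = {}
--     for rest in data:
--         key = (rest['Country'], rest['City'])
--         counts[key] = counts.get(key, 0) + 1
--     items = list(counts.items())
--     return {co: {ci: n for (c, ci), n in items if c == co}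
--             for co in dict.fromkeys(c for (c, _), _ in items)}
-- ===== Notes on version B (the rewrite author's own statement) =====
-- stated objective: alternative
-- what changed: A builds the nested country->city->count dict incrementally inside one loop; B first builds a flat counter keyed by (country, city) pairs and then reshapes it into the nested dict with a comprehension over the distinct countries.
import Mathlib
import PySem

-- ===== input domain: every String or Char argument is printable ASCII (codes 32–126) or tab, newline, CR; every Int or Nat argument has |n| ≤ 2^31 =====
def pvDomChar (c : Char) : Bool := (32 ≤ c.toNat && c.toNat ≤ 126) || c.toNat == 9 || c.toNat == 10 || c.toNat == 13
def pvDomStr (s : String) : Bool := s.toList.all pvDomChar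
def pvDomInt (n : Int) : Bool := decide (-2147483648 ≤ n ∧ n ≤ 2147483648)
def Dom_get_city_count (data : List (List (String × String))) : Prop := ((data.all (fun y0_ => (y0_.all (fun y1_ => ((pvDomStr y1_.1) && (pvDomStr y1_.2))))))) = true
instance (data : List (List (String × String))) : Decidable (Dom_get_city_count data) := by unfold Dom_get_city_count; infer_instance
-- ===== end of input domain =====

-- B replaces A's incremental nested-dict build by two passes — a flat counter keyed by
-- (country, city) pairs, then a comprehension reshaping it into the nested dict
-- (alternative decomposition, same result; no speed claim).

-- ===== PORT A =====
-- rest['Country'] / rest['City'] raise KeyError when the key is missing; Pre_ excludes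
-- those inputs and the port reads a default "" there.
def get_city_count (data : List (List (String × String))) : List (String × List (String × Int)) :=
  (data.foldl (fun city_count rest =>
      let country := (PySem.Dict.mk rest).getD "Country" ""
      let city := (PySem.Dict.mk rest).getD "City" ""
      if city_count.contains country then
        city_count.insert country
          ((city_count.getD country PySem.Dict.empty).insert city
            ((city_count.getD country PySem.Dict.empty).getD city 0 + 1))
      else
        city_count.insert country (PySem.Dict.empty.insert city 1))
    (PySem.Dict.empty : PySem.Dict String (PySem.Dict String Int))).items.map
    (fun p => (p.1, p.2.items))

-- ===== PORT B =====
def get_city_count_alt (data : List (List (String × String))) : List (String × List (String × Int)) :=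
  let counts : PySem.Dict (String × String) Int :=
    data.foldl (fun c rest =>
      let key := ((PySem.Dict.mk rest).getD "Country" "", (PySem.Dict.mk rest).getD "City" "")
      c.insert key (c.getD key 0 + 1)) PySem.Dict.empty
  let items := counts.items
  (PySem.List.dedup (items.map (fun p => p.1.1))).map (fun co =>
    (co, (items.filter (fun p => p.1.1 == co)).map (fun p => (p.1.2, p.2))))

-- ===== PRECONDITION & SPEC =====
-- Pre_ excludes exactly the inputs where A raises KeyError: a record missing the
-- 'Country' or the 'City' key.
def Pre_get_city_count (data : List (List (String × String))) : Prop :=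
  ∀ rest ∈ data, (PySem.Dict.mk rest).contains "Country" = true ∧ (PySem.Dict.mk rest).contains "City" = true
instance (data : List (List (String × String))) : Decidable (Pre_get_city_count data) := by unfold Pre_get_city_count; infer_instance

def pvWitness_get_city_count : (List (List (String × String))) :=
  [[("Country", "US"), ("City", "NYC")], [("Country", "US"), ("City", "LA")]]

def Spec_get_city_count (data : List (List (String × String))) (out : List (String × List (String × Int))) : Prop := out = get_city_count_alt data
instance (data : List (List (String × String))) (out : List (String × List (String × Int))) : Decidable (Spec_get_city_count data out) := by unfold Spec_get_city_count; infer_instance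

-- ===== CLAIM (what is proved, stated in full; the proofs are below) =====
def Claim_equal_get_city_count : Prop := ∀ (data : List (List (String × String))), Dom_get_city_count data → Pre_get_city_count data → Spec_get_city_count data (get_city_count data)

-- ===== LEMMAS AND PROOFS =====

-- the (country, city) key pair both loops extract from a record
def pvKey (rest : List (String × String)) : String × String :=
  ((PySem.Dict.mk rest).getD "Country" "", (PySem.Dict.mk rest).getD "City" "")

-- A's loop body, expressed on the extracted key pair
def pvAStep (res : PySem.Dict String (PySem.Dict String Int)) (k : String × String) :
    PySem.Dict String (PySem.Dict String Int) :=
  if res.contains k.1 then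
    res.insert k.1 ((res.getD k.1 PySem.Dict.empty).insert k.2
      ((res.getD k.1 PySem.Dict.empty).getD k.2 0 + 1))
  else
    res.insert k.1 (PySem.Dict.empty.insert k.2 1)

lemma pvAStep_def (res : PySem.Dict String (PySem.Dict String Int)) (co ci : String) :
    pvAStep res (co, ci)
      = if res.contains co = true then
          res.insert co ((res.getD co PySem.Dict.empty).insert ci
            ((res.getD co PySem.Dict.empty).getD ci 0 + 1))
        else res.insert co (PySem.Dict.empty.insert ci 1) := rfl

-- the inner (city ↦ count) association list both programs end up holding for one country
def pvInner (ks : List (String × String)) (co : String) : List (String × Int) :=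
  ((PySem.Set.ofList ks).filter (fun k => k.1 == co)).map (fun k => (k.2, (ks.count k : Int)))

lemma pv_count_append_ne {k j : String × String} (h : j ≠ k) (ks : List (String × String)) :
    (ks ++ [k]).count j = ks.count j := by
  simp [List.count_append, h.symm]

lemma pv_inner_ne {k : String × String} {co : String} (h : k.1 ≠ co) (ks : List (String × String)) :
    pvInner (ks ++ [k]) co = pvInner ks co := by
  unfold pvInner
  rw [PySem.Set.ofList_append_singleton, PySem.Set.add_eq_ite]
  have hfk : (fun j : String × String => j.1 == co) k = false := by simp [h]
  have hfilter : ∀ l : List (String × String),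
      (l ++ [k]).filter (fun j => j.1 == co) = l.filter (fun j => j.1 == co) := by
    intro l; simp [List.filter_append, hfk]
  have hcnt : ∀ j ∈ (PySem.Set.ofList ks).filter (fun j : String × String => j.1 == co),
      ((ks ++ [k]).count j : Int) = (ks.count j : Int) := by
    intro j hj
    have hj1 : j.1 = co := by simpa using (List.of_mem_filter hj)
    have : j ≠ k := fun he => h (he ▸ hj1)
    rw [pv_count_append_ne this]
  split_ifs with hk
  · exact List.map_congr_left (fun j hj => by rw [hcnt j hj])
  · rw [hfilter]
    exact List.map_congr_left (fun j hj => by rw [hcnt j hj])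

-- a fresh (country, city) pair appends (city, 1) to that country's inner list
lemma pv_inner_append_self {ks : List (String × String)} {co ci : String}
    (hk : (co, ci) ∉ ks) :
    pvInner (ks ++ [(co, ci)]) co = pvInner ks co ++ [(ci, 1)] := by
  unfold pvInner
  have hofl : PySem.Set.ofList (ks ++ [(co, ci)]) = PySem.Set.ofList ks ++ [(co, ci)] := by
    rw [PySem.Set.ofList_append_singleton, PySem.Set.add_of_not_mem]
    rw [PySem.Set.mem_ofList]; exact hk
  rw [hofl, List.filter_append, List.map_append]
  congr 1
  · apply List.map_congr_left
    intro j hj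
    have : j ≠ (co, ci) := by
      rintro rfl; exact hk ((PySem.Set.mem_ofList _ _).mp (List.mem_filter.mp hj).1)
    rw [pv_count_append_ne this]
  · simp [List.count_append, List.count_eq_zero.mpr hk]

-- distinct first occurrences are insensitive to an inner dedup
lemma pv_dedup_map_ofList (f : String × String → String) (ks : List (String × String)) :
    PySem.Set.ofList ((PySem.Set.ofList ks).map f) = PySem.Set.ofList (ks.map f) := by
  induction ks using List.reverseRecOn with
  | nil => rfl
  | append_singleton ks x ih =>
    rw [PySem.Set.ofList_append_singleton]
    by_cases hx : x ∈ PySem.Set.ofList ks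
    · rw [PySem.Set.add_of_mem hx, ih, List.map_append, List.map_singleton,
        PySem.Set.ofList_append_singleton]
      rw [PySem.Set.add_of_mem]
      simp only [PySem.Set.mem_ofList] at hx ⊢
      exact List.mem_map_of_mem hx
    · rw [PySem.Set.add_of_not_mem hx, List.map_append, List.map_singleton,
        PySem.Set.ofList_append_singleton, ih, List.map_append, List.map_singleton,
        PySem.Set.ofList_append_singleton]

-- characterization of A's accumulated nested dict after any prefix of key pairs
lemma pv_afold_items (ks : List (String × String)) :
    (ks.foldl pvAStep PySem.Dict.empty).items
      = (PySem.List.dedup (ks.map Prod.fst)).map (fun co => (co, PySem.Dict.mk (pvInner ks co))) := by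
  induction ks using List.reverseRecOn with
  | nil => rfl
  | append_singleton ks k ih =>
    obtain ⟨co, ci⟩ := k
    rw [List.foldl_append, List.foldl_cons, List.foldl_nil]
    have hkeys : (ks.foldl pvAStep PySem.Dict.empty).keys = PySem.List.dedup (ks.map Prod.fst) := by
      show ((ks.foldl pvAStep PySem.Dict.empty).items).map Prod.fst = _
      rw [ih, List.map_map]; simp [Function.comp_def]
    have hnd : (ks.foldl pvAStep PySem.Dict.empty).keys.Nodup := by
      rw [hkeys, PySem.List.dedup_eq_ofList]; exact PySem.Set.nodup_ofList _
    have hRdedup : PySem.List.dedup ((ks ++ [(co, ci)]).map Prod.fst)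
        = PySem.Set.ofList (ks.map Prod.fst ++ [co]) := by
      simp [PySem.List.dedup_eq_ofList]
    by_cases hco : co ∈ ks.map Prod.fst
    · -- country already present
      have hcont : (ks.foldl pvAStep PySem.Dict.empty).contains co = true := by
        rw [PySem.Dict.contains_eq_decide_mem_keys, hkeys]
        simp [hco]
      have hmem : (co, PySem.Dict.mk (pvInner ks co)) ∈ (ks.foldl pvAStep PySem.Dict.empty).items := by
        rw [ih]
        exact List.mem_map_of_mem (by rw [PySem.List.dedup_eq_ofList, PySem.Set.mem_ofList]; exact hco)
      have hgetD : (ks.foldl pvAStep PySem.Dict.empty).getD co PySem.Dict.empty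
          = PySem.Dict.mk (pvInner ks co) :=
        PySem.Dict.getD_of_mem_items _ hmem hnd _
      have hdd : PySem.List.dedup ((ks ++ [(co, ci)]).map Prod.fst)
          = PySem.List.dedup (ks.map Prod.fst) := by
        rw [hRdedup, PySem.Set.ofList_append_singleton, PySem.Set.add_of_mem,
          PySem.List.dedup_eq_ofList]
        rw [PySem.Set.mem_ofList]; exact hco
      rw [pvAStep_def, if_pos hcont, hgetD]
      rw [PySem.Dict.items_insert_of_contains _ _ hcont, ih, List.map_map, hdd]
      apply List.map_congr_left
      intro co' hco'
      by_cases hceq : co' = co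
      · subst hceq
        simp only [Function.comp_def, beq_self_eq_true, if_true]
        refine Prod.ext rfl ?_
        have hSnd : ((PySem.Set.ofList ks).filter (fun j : String × String => j.1 == co')).Nodup :=
          (PySem.Set.nodup_ofList ks).filter _
        have hkeysI : (PySem.Dict.mk (pvInner ks co')).keys
            = ((PySem.Set.ofList ks).filter (fun j : String × String => j.1 == co')).map Prod.snd := by
          show (pvInner ks co').map Prod.fst = _
          rw [pvInner, List.map_map]; rfl
        have hndI : (PySem.Dict.mk (pvInner ks co')).keys.Nodup := by
          rw [hkeysI]
          apply List.Nodup.map_on _ hSnd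
          intro x hx y hy hxy
          have hx1 : x.1 = co' := by simpa using (List.mem_filter.mp hx).2
          have hy1 : y.1 = co' := by simpa using (List.mem_filter.mp hy).2
          exact Prod.ext (hx1.trans hy1.symm) hxy
        by_cases hk : (co', ci) ∈ ks
        · -- pair seen before: in-place bump of the stored count
          have hS : (co', ci) ∈ (PySem.Set.ofList ks).filter (fun j : String × String => j.1 == co') := by
            rw [List.mem_filter]
            exact ⟨(PySem.Set.mem_ofList _ _).mpr hk, by simp⟩
          have hmemI : (ci, (ks.count (co', ci) : Int)) ∈ pvInner ks co' := by
            rw [pvInner]; exact List.mem_map_of_mem hS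
          have hgi : (PySem.Dict.mk (pvInner ks co')).getD ci 0 = (ks.count (co', ci) : Int) :=
            PySem.Dict.getD_of_mem_items _ hmemI hndI _
          have hcontI : (PySem.Dict.mk (pvInner ks co')).contains ci = true := by
            rw [PySem.Dict.contains_eq_decide_mem_keys, hkeysI]
            simp only [decide_eq_true_eq]
            exact List.mem_map_of_mem hS
          rw [hgi]
          apply PySem.Dict.ext
          rw [PySem.Dict.items_insert_of_contains _ _ hcontI]
          show (pvInner ks co').map _ = pvInner (ks ++ [(co', ci)]) co'
          unfold pvInner
          have hofl : PySem.Set.ofList (ks ++ [(co', ci)]) = PySem.Set.ofList ks := by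
            rw [PySem.Set.ofList_append_singleton, PySem.Set.add_of_mem]
            rw [PySem.Set.mem_ofList]; exact hk
          rw [hofl, List.map_map]
          apply List.map_congr_left
          intro j hj
          have hj1 : j.1 = co' := by simpa using (List.mem_filter.mp hj).2
          by_cases hj2 : j.2 = ci
          · have hjk : j = (co', ci) := Prod.ext hj1 hj2
            subst hjk
            simp [List.count_append]
          · have hjk : j ≠ (co', ci) := by
              intro h; exact hj2 (by rw [h])
            simp only [Function.comp_def]
            rw [if_neg (by simpa using hj2), pv_count_append_ne hjk]
        · -- new city under an existing country: appended to the inner dict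
          have hciS : ci ∉ (PySem.Dict.mk (pvInner ks co')).keys := by
            rw [hkeysI]
            intro hmem'
            obtain ⟨j, hj, hj2⟩ := List.mem_map.mp hmem'
            have hj1 : j.1 = co' := by simpa using (List.mem_filter.mp hj).2
            have : j = (co', ci) := Prod.ext hj1 hj2
            exact hk (by rw [← this]; exact (PySem.Set.mem_ofList _ _).mp (List.mem_filter.mp hj).1)
          have hcontI : (PySem.Dict.mk (pvInner ks co')).contains ci = false := by
            rw [PySem.Dict.contains_eq_decide_mem_keys]
            simpa using hciS
          have hgi : (PySem.Dict.mk (pvInner ks co')).getD ci 0 = 0 :=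
            PySem.Dict.getD_of_not_contains _ _ hcontI
          rw [hgi, zero_add]
          apply PySem.Dict.ext
          rw [PySem.Dict.items_insert_of_not_contains _ _ hcontI]
          show pvInner ks co' ++ [(ci, 1)] = pvInner (ks ++ [(co', ci)]) co'
          exact (pv_inner_append_self hk).symm
      · simp only [Function.comp_def]
        rw [if_neg (by simpa using hceq), pv_inner_ne (by simpa using (Ne.symm hceq)) ks]
    · -- fresh country: appended at the end of the outer dict
      have hcont : (ks.foldl pvAStep PySem.Dict.empty).contains co = false := by
        rw [PySem.Dict.contains_eq_decide_mem_keys, hkeys]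
        simp [hco]
      have hknotin : (co, ci) ∉ ks := fun hm => hco (List.mem_map_of_mem hm)
      rw [pvAStep_def, if_neg (by rw [hcont]; simp)]
      rw [PySem.Dict.items_insert_of_not_contains _ _ hcont, ih]
      have hdd : PySem.List.dedup ((ks ++ [(co, ci)]).map Prod.fst)
          = PySem.List.dedup (ks.map Prod.fst) ++ [co] := by
        rw [hRdedup, PySem.Set.ofList_append_singleton, PySem.Set.add_of_not_mem,
          PySem.List.dedup_eq_ofList]
        rw [PySem.Set.mem_ofList]; exact hco
      rw [hdd, List.map_append]
      congr 1
      · apply List.map_congr_left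
        intro co' hco'
        have : co' ≠ co := by
          rintro rfl
          exact hco ((PySem.List.mem_dedup _ _).mp hco')
        rw [pv_inner_ne (by simpa using Ne.symm this) ks]
      · simp only [List.map_singleton]
        refine congrArg (fun l => [l]) (Prod.ext rfl ?_)
        have : pvInner (ks ++ [(co, ci)]) co = [(ci, 1)] := by
          rw [pv_inner_append_self hknotin]
          have : pvInner ks co = [] := by
            rw [pvInner, List.filter_eq_nil_iff.mpr, List.map_nil]
            intro j hj
            simp only [beq_iff_eq]
            intro hj1
            exact hco (hj1 ▸ List.mem_map_of_mem ((PySem.Set.mem_ofList _ _).mp hj))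
          rw [this, List.nil_append]
        rw [this]
        rfl

-- A's result, in closed form
lemma pv_A_eq (data : List (List (String × String))) :
    get_city_count data
      = (PySem.List.dedup ((data.map pvKey).map Prod.fst)).map
          (fun co => (co, pvInner (data.map pvKey) co)) := by
  unfold get_city_count
  rw [show (fun (city_count : PySem.Dict String (PySem.Dict String Int)) rest =>
      let country := (PySem.Dict.mk rest).getD "Country" ""
      let city := (PySem.Dict.mk rest).getD "City" ""
      if city_count.contains country then
        city_count.insert country
          ((city_count.getD country PySem.Dict.empty).insert city
            ((city_count.getD country PySem.Dict.empty).getD city 0 + 1))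
      else
        city_count.insert country (PySem.Dict.empty.insert city 1))
    = (fun cc rest => pvAStep cc (pvKey rest)) from rfl]
  rw [← List.foldl_map (f := pvKey) (g := pvAStep), pv_afold_items]
  simp [List.map_map, Function.comp_def]

-- B's result, in the same closed form
lemma pv_B_eq (data : List (List (String × String))) :
    get_city_count_alt data
      = (PySem.List.dedup ((data.map pvKey).map Prod.fst)).map
          (fun co => (co, pvInner (data.map pvKey) co)) := by
  unfold get_city_count_alt
  rw [show (fun (c : PySem.Dict (String × String) Int) rest =>
      let key := ((PySem.Dict.mk rest).getD "Country" "", (PySem.Dict.mk rest).getD "City" "")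
      c.insert key (c.getD key 0 + 1))
    = (fun c rest => c.insert (pvKey rest) (c.getD (pvKey rest) 0 + 1)) from rfl]
  dsimp only
  rw [← List.foldl_map (f := pvKey) (g := fun (d : PySem.Dict (String × String) Int) x => d.insert x (d.getD x 0 + 1)),
    PySem.Dict.foldl_insert_getD_add_one_eq_counter, PySem.Dict.items_counter]
  simp only [List.map_map, List.filter_map, PySem.List.dedup_eq_ofList, Function.comp_def]
  rw [pv_dedup_map_ofList]
  simp [pvInner, List.map_map, Function.comp_def]

-- ===== VERDICT (by name: the statement is the Claim_ definition above) =====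
theorem get_city_count_spec : Claim_equal_get_city_count := by
  intro data _ _
  unfold Spec_get_city_count
  rw [pv_A_eq, pv_B_eq]
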